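-- pv_equiv track=rewrite | github.com/SSung023/Coding-test | Programmers/python/성격 유형 검사하기.py | solution
-- ===== SOURCE A (Python) =====
-- def find(personal, type1, type2):
--     weight1 = personal[type1]
--     weight2 = personal[type2]
--
--     if weight1 == weight2:
--         return type1 if type1 < type2 else type2
--
--     return type1 if weight1 > weight2 else type2
--
-- def solution(survey, choices):
--     answer = ''
--     personal = {'R':0, 'T':0, 'C':0, 'F':0, 'J':0, 'M':0, 'A':0, 'N':0}
--     weight = [-3, -2, -1, 0, 1, 2, 3]
--     length = len(survey)
--
--     for i in range(0, length):
--         negative = survey[i][0]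
--         positive = survey[i][1]
--         choice = choices[i] - 1
--
--         if weight[choice] > 0:
--             personal[positive] = personal[positive] + weight[choice]
--         else:
--             personal[negative] = personal[negative] + (weight[choice] * -1)
--
--     answer += find(personal, 'R', 'T')
--     answer += find(personal, 'C', 'F')
--     answer += find(personal, 'J', 'M')
--     answer += find(personal, 'A', 'N')
--
--     return answer
-- ===== SOURCE B (Python) =====
-- def solution(survey, choices):
--     # one signed counter per dichotomy; positive means the alphabetically-larger letter leads
--     idx = {'R': 0, 'T': 0, 'C': 1, 'F': 1, 'J': 2, 'M': 2, 'A': 3, 'N': 3}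
--     score = [0, 0, 0, 0]
--     for q, c in zip(survey, choices):
--         sign = 1 if q[1] in 'TFMN' else -1
--         score[idx[q[1]]] += sign * (c - 4)
--     return ''.join(h if v > 0 else l for v, l, h in zip(score, 'RCJA', 'TFMN'))
-- ===== Notes on version B (the rewrite author's own statement) =====
-- stated objective: simpler
-- what changed: Replaces the 8-letter score dict and the positive/negative branch with four signed per-dichotomy counters updated in one signed step (score += sign*(c-4)) over zip(survey, choices), and builds the answer by a join over the counters' signs instead of a pairwise find helper.
-- outside the precondition, e.g. on solution(['RT'], [0]): A returns 'TCJA', B returns 'RCJA'; on solution(['FT'], [1]): A returns 'RFJA', B returns 'RCJA'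
import Mathlib
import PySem

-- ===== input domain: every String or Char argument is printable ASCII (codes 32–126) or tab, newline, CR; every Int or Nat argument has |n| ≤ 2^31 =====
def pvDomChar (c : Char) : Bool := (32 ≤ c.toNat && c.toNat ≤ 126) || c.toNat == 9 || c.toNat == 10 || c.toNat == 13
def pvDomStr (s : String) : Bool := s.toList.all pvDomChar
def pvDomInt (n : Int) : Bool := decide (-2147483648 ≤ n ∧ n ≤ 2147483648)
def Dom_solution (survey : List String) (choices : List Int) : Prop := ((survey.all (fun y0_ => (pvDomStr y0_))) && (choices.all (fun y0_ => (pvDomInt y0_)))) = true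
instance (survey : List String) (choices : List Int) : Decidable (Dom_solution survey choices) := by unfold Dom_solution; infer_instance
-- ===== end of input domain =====

-- B replaces the 8-letter score dict and the sign branch by four signed per-dichotomy
-- counters updated in one signed step; objective: simpler (same O(n) cost).

-- ===== PORT A =====
-- find(personal, type1, type2); the 1-char Python strings are ported as Char
def pyFind (personal : PySem.Dict Char Int) (type1 type2 : Char) : Char :=
  let weight1 := personal.getD type1 0   -- personal[type1]; key always present under Pre_
  let weight2 := personal.getD type2 0
  if weight1 = weight2 then (if type1 < type2 then type1 else type2)
  else if weight1 > weight2 then type1 else type2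

def solution (survey : List String) (choices : List Int) : String :=
  let personal : PySem.Dict Char Int :=
    PySem.Dict.mk [('R',0),('T',0),('C',0),('F',0),('J',0),('M',0),('A',0),('N',0)]
  let weight : List Int := [-3, -2, -1, 0, 1, 2, 3]
  let length : Int := survey.length
  let personal := (PySem.List.pyRange 0 length 1).foldl (fun personal i =>
    let si := PySem.List.pyGetD survey i ""          -- survey[i]
    let negative := (PySem.Str.pyGet? si 0).getD ' ' -- survey[i][0]
    let positive := (PySem.Str.pyGet? si 1).getD ' ' -- survey[i][1]
    let choice := PySem.List.pyGetD choices i 0 - 1  -- choices[i] - 1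
    if PySem.List.pyGetD weight choice 0 > 0 then
      PySem.Dict.insert personal positive (personal.getD positive 0 + PySem.List.pyGetD weight choice 0)
    else
      PySem.Dict.insert personal negative (personal.getD negative 0 + PySem.List.pyGetD weight choice 0 * (-1))
    ) personal
  -- answer += find(...) four times; built as a char list, returned as a String
  String.mk ([] ++ [pyFind personal 'R' 'T'] ++ [pyFind personal 'C' 'F']
                ++ [pyFind personal 'J' 'M'] ++ [pyFind personal 'A' 'N'])

-- ===== PORT B =====
-- loop body of Source B (one signed counter per dichotomy)
def bStep (score : List Int) (qc : String × Int) : List Int :=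
  let h := (PySem.Str.pyGet? qc.1 1).getD ' '                 -- q[1]
  let s : Int := if ("TFMN".toList.contains h) then 1 else -1 -- q[1] in 'TFMN'
  let j := (PySem.Dict.mk [('R',(0:Int)),('T',0),('C',1),('F',1),('J',2),('M',2),('A',3),('N',3)]).getD h 0
  PySem.List.pySetD score j (PySem.List.pyGetD score j 0 + s * (qc.2 - 4))

def solution_alt (survey : List String) (choices : List Int) : String :=
  let score := (survey.zip choices).foldl bStep [0, 0, 0, 0]
  String.mk ((score.zip ("RCJA".toList.zip "TFMN".toList)).map
    (fun vlh => if vlh.1 > 0 then vlh.2.2 else vlh.2.1))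

-- ===== PRECONDITION & SPEC =====
-- Pre_ restricts to the task's natural domain: each survey item is one of the eight
-- complementary-pair strings and each used choice is 1..7. A also RETURNS (without raising)
-- on malformed two-letter items such as "RC" and on choices in -6..0 via Python's
-- negative-index wraparound into the weight list — those accidental inputs are excluded.
def Pre_solution (survey : List String) (choices : List Int) : Prop :=
  survey.length ≤ choices.length ∧
  (∀ q ∈ survey, q ∈ (["RT","TR","CF","FC","JM","MJ","AN","NA"] : List String)) ∧
  (∀ c ∈ choices.take survey.length, 1 ≤ c ∧ c ≤ 7)
instance (survey : List String) (choices : List Int) : Decidable (Pre_solution survey choices) := by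
  unfold Pre_solution; infer_instance

def pvWitness_solution : List String × List Int := (["AN", "CF", "MJ", "RT", "NA"], [5, 3, 2, 7, 5])

def Spec_solution (survey : List String) (choices : List Int) (out : String) : Prop := out = solution_alt survey choices
instance (survey : List String) (choices : List Int) (out : String) : Decidable (Spec_solution survey choices out) := by unfold Spec_solution; infer_instance

-- ===== CLAIM (what is proved, stated in full; the proofs are below) =====
def Claim_equal_solution : Prop := ∀ (survey : List String) (choices : List Int), Dom_solution survey choices → Pre_solution survey choices → Spec_solution survey choices (solution survey choices)

-- ===== LEMMAS AND PROOFS =====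

-- proof-side form of A's loop body, on a (survey item, choice) pair
def aStep (personal : PySem.Dict Char Int) : String × Int → PySem.Dict Char Int
  | (q, ch) =>
    if PySem.List.pyGetD [(-3 : Int), -2, -1, 0, 1, 2, 3] (ch - 1) 0 > 0 then
      PySem.Dict.insert personal ((PySem.Str.pyGet? q 1).getD ' ')
        (personal.getD ((PySem.Str.pyGet? q 1).getD ' ') 0 + PySem.List.pyGetD [(-3 : Int), -2, -1, 0, 1, 2, 3] (ch - 1) 0)
    else
      PySem.Dict.insert personal ((PySem.Str.pyGet? q 0).getD ' ')
        (personal.getD ((PySem.Str.pyGet? q 0).getD ' ') 0 + PySem.List.pyGetD [(-3 : Int), -2, -1, 0, 1, 2, 3] (ch - 1) 0 * (-1))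

-- A's index loop is the zip loop
lemma fold_range_eq_zip {δ : Type} (f : δ → String × Int → δ) :
    ∀ (ss : List String) (cs : List Int), ss.length ≤ cs.length → ∀ (init : δ),
    (List.range ss.length).foldl (fun d k => f d (ss.getD k "", cs.getD k 0)) init
    = (ss.zip cs).foldl f init := by
  intro ss
  induction ss with
  | nil => intro cs h init; simp
  | cons s ss ih =>
    intro cs h init
    cases cs with
    | nil => simp at h
    | cons c cs =>
      rw [List.length_cons, List.range_succ_eq_map]
      simp only [List.foldl_cons, List.foldl_map, List.getD_cons_zero, List.getD_cons_succ]
      simpa using ih cs (by simpa using h) (f init (s, c))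

lemma fold_idx_eq_zip {δ : Type} (f : δ → String × Int → δ)
    (ss : List String) (cs : List Int) (h : ss.length ≤ cs.length) (init : δ) :
    (PySem.List.pyRange 0 (ss.length : Int) 1).foldl
      (fun d i => f d (PySem.List.pyGetD ss i "", PySem.List.pyGetD cs i 0)) init
    = (ss.zip cs).foldl f init := by
  rw [PySem.List.pyRange_one]
  simp only [Int.sub_zero, Int.toNat_natCast, List.foldl_map, zero_add,
    PySem.List.pyGetD_natCast]
  exact fold_range_eq_zip f ss cs h init

-- abstraction: the four signed dichotomy scores of the letter dict
def phi (d : PySem.Dict Char Int) : List Int :=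
  [d.getD 'T' 0 - d.getD 'R' 0, d.getD 'F' 0 - d.getD 'C' 0,
   d.getD 'M' 0 - d.getD 'J' 0, d.getD 'N' 0 - d.getD 'A' 0]

lemma weight_val (ch : Int) (h1 : 1 ≤ ch) (h7 : ch ≤ 7) :
    PySem.List.pyGetD [(-3 : Int), -2, -1, 0, 1, 2, 3] (ch - 1) 0 = ch - 4 := by
  interval_cases ch <;> decide

lemma step_comm (d : PySem.Dict Char Int) (q : String)
    (hq : q ∈ (["RT","TR","CF","FC","JM","MJ","AN","NA"] : List String))
    (ch : Int) (h1 : 1 ≤ ch) (h7 : ch ≤ 7) :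
    phi (aStep d (q, ch)) = bStep (phi d) (q, ch) := by
  have hw := weight_val ch h1 h7
  fin_cases hq <;>
  · simp only [aStep, bStep]
    rw [hw]
    by_cases hpos : ch - 4 > 0 <;>
      [rw [if_pos hpos]; rw [if_neg hpos]] <;>
      · simp [phi, PySem.Dict.getD_eq_get?_getD, PySem.Dict.get?_mk_cons, PySem.Dict.get?_insert,
          PySem.List.pySetD, PySem.List.pySet?, PySem.List.pyGetD, PySem.List.pyGet?,
          PySem.List.pyIdx?, PySem.Str.pyGet?]
        omega

lemma fold_comm (l : List (String × Int))
    (hl : ∀ qc ∈ l, qc.1 ∈ (["RT","TR","CF","FC","JM","MJ","AN","NA"] : List String) ∧ 1 ≤ qc.2 ∧ qc.2 ≤ 7) :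
    ∀ d : PySem.Dict Char Int,
      phi (l.foldl aStep d) = l.foldl bStep (phi d) := by
  induction l with
  | nil => intro d; rfl
  | cons qc l ih =>
    intro d
    obtain ⟨hq, h1, h7⟩ := hl qc (by simp)
    simp only [List.foldl_cons]
    rw [ih (fun x hx => hl x (by simp [hx])), step_comm d qc.1 hq qc.2 h1 h7]

lemma pyFind_eq (d : PySem.Dict Char Int) (t1 t2 : Char) (hlt : t1 < t2) :
    pyFind d t1 t2 = if d.getD t2 0 - d.getD t1 0 > 0 then t2 else t1 := by
  simp only [pyFind]
  rcases lt_trichotomy (d.getD t1 0) (d.getD t2 0) with h | h | h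
  · rw [if_neg (by omega), if_neg (by omega), if_pos (by omega)]
  · rw [if_pos h, if_pos hlt, if_neg (by omega)]
  · rw [if_neg (by omega), if_pos (by omega), if_neg (by omega)]

lemma zip_take_len {α β : Type} (l1 : List α) (l2 : List β) :
    l1.zip l2 = l1.zip (l2.take l1.length) := by
  induction l1 generalizing l2 with
  | nil => simp
  | cons x l1 ih =>
    cases l2 with
    | nil => simp
    | cons y l2 =>
      simp only [List.length_cons, List.take_succ_cons, List.zip_cons_cons]
      rw [← ih]

-- ===== VERDICT (by name: the statement is the Claim_ definition above) =====
theorem solution_spec : Claim_equal_solution := by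
  intro survey choices _hdom hpre
  obtain ⟨hlen, hsv, hch⟩ := hpre
  have hA : solution survey choices =
      String.mk
        (let L := (PySem.List.pyRange 0 (survey.length : Int) 1).foldl
          (fun d i => aStep d (PySem.List.pyGetD survey i "", PySem.List.pyGetD choices i 0))
          (PySem.Dict.mk [('R',0),('T',0),('C',0),('F',0),('J',0),('M',0),('A',0),('N',0)])
        [pyFind L 'R' 'T', pyFind L 'C' 'F', pyFind L 'J' 'M', pyFind L 'A' 'N']) := rfl
  rw [Spec_solution, hA]
  rw [fold_idx_eq_zip aStep survey choices hlen]
  have hcond : ∀ qc ∈ survey.zip choices,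
      qc.1 ∈ (["RT","TR","CF","FC","JM","MJ","AN","NA"] : List String) ∧ 1 ≤ qc.2 ∧ qc.2 ≤ 7 := by
    intro qc hqc
    rw [zip_take_len] at hqc
    have := List.of_mem_zip hqc
    exact ⟨hsv _ this.1, hch _ this.2⟩
  have hphi := fold_comm (survey.zip choices) hcond
    (PySem.Dict.mk [('R',0),('T',0),('C',0),('F',0),('J',0),('M',0),('A',0),('N',0)])
  set L := (survey.zip choices).foldl aStep
    (PySem.Dict.mk [('R',0),('T',0),('C',0),('F',0),('J',0),('M',0),('A',0),('N',0)]) with hL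
  have hphi0 : phi (PySem.Dict.mk [('R',(0:Int)),('T',0),('C',0),('F',0),('J',0),('M',0),('A',0),('N',0)])
      = [0, 0, 0, 0] := by decide
  rw [hphi0] at hphi
  show String.mk [pyFind L 'R' 'T', pyFind L 'C' 'F', pyFind L 'J' 'M', pyFind L 'A' 'N']
    = solution_alt survey choices
  unfold solution_alt
  rw [← hphi]
  rw [pyFind_eq L 'R' 'T' (by decide), pyFind_eq L 'C' 'F' (by decide),
    pyFind_eq L 'J' 'M' (by decide), pyFind_eq L 'A' 'N' (by decide)]
  simp [phi]
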